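-- pv_equiv track=rewrite | github.com/hungson175/deep-research-langchain | src/opp_ceo_agent_topic_generator.py | _simple_extract_briefs
-- ===== SOURCE A (Python) =====
-- from typing import List, Literal
--
-- def _simple_extract_briefs(response_content: str) -> List[str]:
--     """Simple fallback method to extract briefs from text."""
--     lines = response_content.split('\n')
--     briefs = []
--     current_brief = []
--
--     for line in lines:
--         line_stripped = line.strip()
--         # Look for brief boundaries
--         if line_stripped and any(line_stripped.startswith(prefix) for prefix in ['1.', '2.', '3.', '4.', '5.', '##', 'Brief']):
--             if current_brief:
--                 briefs.append('\n'.join(current_brief))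
--                 current_brief = []
--             current_brief.append(line)
--         elif current_brief:
--             current_brief.append(line)
--
--     # Add last brief
--     if current_brief:
--         briefs.append('\n'.join(current_brief))
--
--     return briefs if briefs else [response_content]
-- ===== SOURCE B (Python) =====
-- from typing import List
--
-- _BOUNDARY_PREFIXES = ('1.', '2.', '3.', '4.', '5.', '##', 'Brief')
--
--
-- def _is_boundary(line: str) -> bool:
--     s = line.strip()
--     return bool(s) and s.startswith(_BOUNDARY_PREFIXES)
--
--
-- def _chop(first: str, rest: List[str]) -> List[str]:
--     """first is a boundary line; take its body (lines up to the next boundary),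
--     then recurse on the remainder."""
--     body = []
--     while rest and not _is_boundary(rest[0]):
--         body.append(rest[0])
--         rest = rest[1:]
--     group = '\n'.join([first] + body)
--     if not rest:
--         return [group]
--     return [group] + _chop(rest[0], rest[1:])
--
--
-- def _simple_extract_briefs(response_content: str) -> List[str]:
--     """Simple fallback method to extract briefs from text."""
--     lines = response_content.split('\n')
--     # skip everything before the first boundary line
--     while lines and not _is_boundary(lines[0]):
--         lines = lines[1:]
--     if not lines:
--         return [response_content]
--     return _chop(lines[0], lines[1:])
-- ===== Notes on version B (the rewrite author's own statement) =====
-- stated objective: alternative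
-- what changed: Replaces A's single accumulator loop over (briefs, current_brief) state with a skip-to-first-boundary pass followed by structural recursion that chops one group (boundary line plus its run of body lines) off the front at a time.
import Mathlib
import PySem

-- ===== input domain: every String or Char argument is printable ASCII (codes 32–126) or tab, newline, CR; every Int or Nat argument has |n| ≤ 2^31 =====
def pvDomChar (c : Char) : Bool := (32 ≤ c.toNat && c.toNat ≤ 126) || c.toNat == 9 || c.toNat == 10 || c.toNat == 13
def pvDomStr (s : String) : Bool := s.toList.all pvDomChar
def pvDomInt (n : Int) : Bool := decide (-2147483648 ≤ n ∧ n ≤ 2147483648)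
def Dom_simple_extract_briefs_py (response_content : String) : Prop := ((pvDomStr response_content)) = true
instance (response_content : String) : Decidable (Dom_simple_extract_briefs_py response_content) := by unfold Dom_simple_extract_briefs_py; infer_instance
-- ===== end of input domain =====

-- B replaces A's accumulator loop over (briefs, current_brief) state by a skip-to-first-boundary
-- pass followed by structural recursion chopping one group off the front at a time (objective: alternative).

-- shared boundary test (A inlines it, B names it _is_boundary; same expression)
def isBoundary (line : String) : Bool :=
  let s := PySem.Str.strip line
  (!(s == "")) && (["1.", "2.", "3.", "4.", "5.", "##", "Brief"].any fun p => PySem.Str.startswith s p)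

-- ===== PORT A =====
-- one iteration of A's for-loop over state (briefs, current_brief)
def stepA (st : List String × List String) (line : String) : List String × List String :=
  if isBoundary line then
    if st.2 ≠ [] then (st.1 ++ [PySem.Str.join "\n" st.2], [line])
    else (st.1, st.2 ++ [line])
  else
    if st.2 ≠ [] then (st.1, st.2 ++ [line]) else st

-- A's trailing "add last brief"
def finishA (st : List String × List String) : List String :=
  if st.2 ≠ [] then st.1 ++ [PySem.Str.join "\n" st.2] else st.1

def simple_extract_briefs_py (response_content : String) : List String :=
  let lines := (PySem.Chars.splitOn response_content.toList ['\n']).map String.ofList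
  let briefs := finishA (lines.foldl stepA ([], []))
  if briefs ≠ [] then briefs else [response_content]

-- ===== PORT B =====
-- B's while-loop in _chop: split off the run of non-boundary lines (body, remainder)
def splitRun : List String → List String × List String
  | [] => ([], [])
  | l :: rest =>
    if isBoundary l then ([], l :: rest)
    else
      let br := splitRun rest
      (l :: br.1, br.2)

-- termination fact chop needs (cited by name in decreasing_by)
theorem splitRun_snd_length_le (ls : List String) : (splitRun ls).2.length ≤ ls.length := by
  induction ls with
  | nil => simp [splitRun]
  | cons l rest ih =>
    simp only [splitRun]
    split
    · simp
    · simpa using Nat.le_succ_of_le ih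

def chop (first : String) (rest : List String) : List String :=
  match h : (splitRun rest).2 with
  | [] => [PySem.Str.join "\n" (first :: (splitRun rest).1)]
  | h2 :: t => PySem.Str.join "\n" (first :: (splitRun rest).1) :: chop h2 t
termination_by rest.length
decreasing_by
  have := splitRun_snd_length_le rest
  rw [h] at this
  simp at this
  omega

def simple_extract_briefs_py_alt (response_content : String) : List String :=
  let lines := (PySem.Chars.splitOn response_content.toList ['\n']).map String.ofList
  match lines.dropWhile (fun l => !isBoundary l) with
  | [] => [response_content]
  | h :: t => chop h t

-- ===== PRECONDITION & SPEC =====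
def Spec_simple_extract_briefs_py (response_content : String) (out : List String) : Prop := out = simple_extract_briefs_py_alt response_content
instance (response_content : String) (out : List String) : Decidable (Spec_simple_extract_briefs_py response_content out) := by unfold Spec_simple_extract_briefs_py; infer_instance

-- ===== CLAIM (what is proved, stated in full; the proofs are below) =====
def Claim_equal_simple_extract_briefs_py : Prop := ∀ (response_content : String), Dom_simple_extract_briefs_py response_content → Spec_simple_extract_briefs_py response_content (simple_extract_briefs_py response_content)

-- ===== LEMMAS AND PROOFS =====

theorem splitRun_eq (ls : List String) :
    splitRun ls = (ls.takeWhile (fun l => !isBoundary l), ls.dropWhile (fun l => !isBoundary l)) := by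
  induction ls with
  | nil => simp [splitRun]
  | cons l rest ih =>
    simp only [splitRun, List.takeWhile, List.dropWhile, ih]
    cases hb : isBoundary l <;> simp [*]

-- grouping function characterising A's loop once current_brief is nonempty
def G (cur : List String) : List String → List String
  | [] => [PySem.Str.join "\n" cur]
  | l :: ls =>
    if isBoundary l then PySem.Str.join "\n" cur :: G [l] ls
    else G (cur ++ [l]) ls

theorem foldA_eq (lines : List String) :
    ∀ (briefs cur : List String), cur ≠ [] →
      finishA (lines.foldl stepA (briefs, cur)) = briefs ++ G cur lines := by
  induction lines with
  | nil =>
    intro briefs cur h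
    simp [finishA, G, h]
  | cons l ls ih =>
    intro briefs cur h
    simp only [List.foldl_cons, G]
    cases hb : isBoundary l with
    | true =>
      have : stepA (briefs, cur) l = (briefs ++ [PySem.Str.join "\n" cur], [l]) := by
        simp [stepA, hb, h]
      rw [this, ih _ [l] (by simp)]
      simp
    | false =>
      have : stepA (briefs, cur) l = (briefs, cur ++ [l]) := by
        simp [stepA, hb, h]
      rw [this, ih _ (cur ++ [l]) (by simp)]
      simp

theorem chop_eq (first : String) (rest : List String) :
    chop first rest =
      PySem.Str.join "\n" (first :: rest.takeWhile (fun l => !isBoundary l)) ::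
        (match rest.dropWhile (fun l => !isBoundary l) with
          | [] => []
          | h :: t => chop h t) := by
  rw [chop, splitRun_eq]
  cases hd : List.dropWhile (fun l => !isBoundary l) rest <;> simp [*]

theorem chop_ne_nil (first : String) (rest : List String) : chop first rest ≠ [] := by
  rw [chop_eq]; simp

theorem G_eq_chop (lines : List String) :
    ∀ (first : String) (body : List String),
      G (first :: body) lines =
        PySem.Str.join "\n" ((first :: body) ++ lines.takeWhile (fun l => !isBoundary l)) ::
          (match lines.dropWhile (fun l => !isBoundary l) with
            | [] => []
            | h :: t => chop h t) := by
  induction lines with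
  | nil => intro first body; simp [G]
  | cons l ls ih =>
    intro first body
    simp only [G, List.takeWhile, List.dropWhile]
    cases hb : isBoundary l with
    | true =>
      simp only [if_true, Bool.not_true]
      rw [ih l [], chop_eq]
      simp
    | false =>
      simp only [Bool.not_false]
      have : (first :: body) ++ [l] = first :: (body ++ [l]) := by simp
      rw [show G ((first :: body) ++ [l]) ls = G (first :: (body ++ [l])) ls by rw [this]] at *
      rw [ih first (body ++ [l])]
      simp

theorem main_core (lines : List String) (rc : String) :
    (let briefs := finishA (lines.foldl stepA ([], []));
      if briefs ≠ [] then briefs else [rc]) =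
    (match lines.dropWhile (fun l => !isBoundary l) with
      | [] => [rc]
      | h :: t => chop h t) := by
  induction lines with
  | nil => simp [finishA]
  | cons l ls ih =>
    simp only [List.foldl_cons, List.dropWhile]
    cases hb : isBoundary l with
    | false =>
      have : stepA ([], []) l = ([], []) := by simp [stepA, hb]
      rw [this]
      simpa [hb] using ih
    | true =>
      have hstep : stepA ([], []) l = ([], [l]) := by simp [stepA, hb]
      rw [hstep]
      have hfold := foldA_eq ls [] [l] (by simp)
      simp only [List.nil_append] at hfold
      have hG := G_eq_chop ls l []
      simp only [List.cons_append, List.nil_append] at hG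
      rw [← chop_eq] at hG
      simp [hfold, hG, chop_ne_nil]

-- ===== VERDICT (by name: the statement is the Claim_ definition above) =====
theorem simple_extract_briefs_py_spec : Claim_equal_simple_extract_briefs_py := by
  intro rc _
  unfold Spec_simple_extract_briefs_py simple_extract_briefs_py simple_extract_briefs_py_alt
  exact main_core ((PySem.Chars.splitOn rc.toList ['\n']).map String.ofList) rc
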